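-- pv_equiv track=rewrite | github.com/littlefish0331/Python-pengpeng-2020 | python-training/past-exam/Q04.py | func
-- ===== SOURCE A (Python) =====
-- def func(a, b):
--     s=100
--     if a>b:
--         t=a
--         a=b
--         b=t
--     for i in range(0, a):
--         for j in range(i, b):
--             s=s-j
--     return(s)
-- ===== SOURCE B (Python) =====
-- def func(a, b):
--     lo, hi = (a, b) if a <= b else (b, a)
--     if lo <= 0:
--         return 100
--     # sum_{i=0}^{lo-1} sum_{j=i}^{hi-1} j = lo*T(hi-1) - sum_{i<lo} T(i-1)
--     # with T(n)=n(n+1)/2; the second term is C(lo,3).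
--     return 100 - (lo * hi * (hi - 1) // 2 - lo * (lo - 1) * (lo - 2) // 6)
-- ===== Notes on version B (the rewrite author's own statement) =====
-- stated objective: faster
-- what changed: replaces the O(a*b) nested subtraction loops by a closed-form triangular/tetrahedral-number formula evaluated in O(1)
import Mathlib
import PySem

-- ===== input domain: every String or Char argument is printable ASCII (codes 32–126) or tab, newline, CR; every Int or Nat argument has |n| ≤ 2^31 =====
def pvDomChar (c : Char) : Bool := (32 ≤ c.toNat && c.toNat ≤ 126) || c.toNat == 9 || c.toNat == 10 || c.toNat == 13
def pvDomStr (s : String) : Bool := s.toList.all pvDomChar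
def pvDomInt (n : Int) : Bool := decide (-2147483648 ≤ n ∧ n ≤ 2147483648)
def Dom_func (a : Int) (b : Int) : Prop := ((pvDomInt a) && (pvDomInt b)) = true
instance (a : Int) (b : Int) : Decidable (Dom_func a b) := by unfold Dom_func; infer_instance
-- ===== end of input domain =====

-- B replaces A's O(a*b) nested subtraction loops by a closed-form O(1) formula (faster).

-- ===== PORT A =====
-- literal transliteration: optional swap, then the two nested loops over ranges
def func (a : Int) (b : Int) : Int :=
  let p := if a > b then (b, a) else (a, b)
  (PySem.List.pyRange 0 p.1 1).foldl
    (fun s i => (PySem.List.pyRange i p.2 1).foldl (fun s j => s - j) s) 100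

-- ===== PORT B =====
-- literal transliteration of Source B: min/max, early return, closed-form with Python //
def func_alt (a : Int) (b : Int) : Int :=
  let lo := if a ≤ b then a else b
  let hi := if a ≤ b then b else a
  if lo ≤ 0 then 100
  else 100 - (PySem.Int.floordiv (lo * hi * (hi - 1)) 2
              - PySem.Int.floordiv (lo * (lo - 1) * (lo - 2)) 6)

-- ===== PRECONDITION & SPEC =====
def Spec_func (a : Int) (b : Int) (out : Int) : Prop := out = func_alt a b
instance (a : Int) (b : Int) (out : Int) : Decidable (Spec_func a b out) := by unfold Spec_func; infer_instance

-- ===== CLAIM (what is proved, stated in full; the proofs are below) =====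
def Claim_equal_func : Prop := ∀ (a : Int) (b : Int), Dom_func a b → Spec_func a b (func a b)

-- ===== LEMMAS AND PROOFS =====

theorem foldl_sub (l : List Int) (a : Int) :
    l.foldl (fun s j => s - j) a = a - l.sum := by
  induction l generalizing a with
  | nil => simp
  | cons x xs ih => simp [List.foldl, ih]; ring

theorem sum_pyRange_one (n : Nat) : ∀ (i b : Int), b - i = n →
    2 * (PySem.List.pyRange i b 1).sum = b * (b - 1) - i * (i - 1) := by
  induction n with
  | zero =>
    intro i b h
    rw [PySem.List.pyRange_one_eq_nil (by omega)]
    have : b = i := by omega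
    subst this; simp
  | succ n ih =>
    intro i b h
    rw [PySem.List.pyRange_one_cons (by omega)]
    have ih' := ih (i + 1) b (by omega)
    simp only [List.sum_cons]
    linear_combination ih'

theorem two_dvd_succ_mul (n : Int) : (2 : Int) ∣ n * (n + 1) := by
  rcases Int.even_or_odd n with ⟨k, hk⟩ | ⟨k, hk⟩
  · exact ⟨k * (n + 1), by subst hk; ring⟩
  · exact ⟨n * (k + 1), by subst hk; ring⟩

theorem six_dvd_three_consec (m : Nat) :
    (6 : Int) ∣ (m : Int) * ((m : Int) + 1) * ((m : Int) + 2) := by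
  induction m with
  | zero => simp
  | succ m ih =>
    obtain ⟨k, hk⟩ := two_dvd_succ_mul ((m : Int) + 1)
    obtain ⟨q, hq⟩ := ih
    refine ⟨q + k, ?_⟩
    push_cast
    linear_combination hq + 3 * hk

theorem outer_loop (n : Nat) : ∀ (lo hi : Int), lo = n → lo ≤ hi →
    6 * ((PySem.List.pyRange 0 lo 1).foldl
      (fun s i => (PySem.List.pyRange i hi 1).foldl (fun s j => s - j) s) 100)
    = 600 - (3 * (lo * hi * (hi - 1)) - lo * (lo - 1) * (lo - 2)) := by
  induction n with
  | zero =>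
    intro lo hi h hle
    subst h
    rw [PySem.List.pyRange_one_eq_nil (by omega)]
    simp
  | succ n ih =>
    intro lo hi h hle
    have h1 : PySem.List.pyRange 0 lo 1
        = PySem.List.pyRange 0 (lo - 1) 1 ++ [lo - 1] := by
      rw [PySem.List.pyRange_one_append 0 (lo - 1) lo (by omega) (by omega)]
      congr 1
      rw [show lo = lo - 1 + 1 by ring]
      simpa using PySem.List.pyRange_one_singleton (a := lo - 1)
    rw [h1, List.foldl_append]
    simp only [List.foldl_cons, List.foldl_nil]
    rw [foldl_sub]
    have ih' := ih (lo - 1) hi (by omega) (by omega)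
    have hs := sum_pyRange_one (hi - (lo - 1)).toNat (lo - 1) hi (by omega)
    linear_combination ih' - 3 * hs

-- ===== VERDICT (by name: the statement is the Claim_ definition above) =====
theorem func_spec : Claim_equal_func := by
  intro a b _
  unfold Spec_func func func_alt
  by_cases hab : a ≤ b
  · simp only [if_pos hab, if_neg (by omega : ¬ a > b)]
    by_cases hlo : a ≤ 0
    · rw [PySem.List.pyRange_one_eq_nil (by omega)]
      simp [hlo]
    · rw [if_neg hlo]
      have hF := outer_loop a.toNat a b (by omega) hab
      have d2 : (2 : Int) ∣ a * b * (b - 1) := by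
        obtain ⟨k, hk⟩ := two_dvd_succ_mul (b - 1)
        exact ⟨a * k, by linear_combination a * hk⟩
      have d6 : (6 : Int) ∣ a * (a - 1) * (a - 2) := by
        obtain ⟨q, hq⟩ := six_dvd_three_consec (a - 2).toNat
        by_cases h2 : 2 ≤ a
        · exact ⟨q, by rw [show (((a - 2).toNat : Int)) = a - 2 by omega] at hq; linear_combination hq⟩
        · have : a = 1 := by omega
          subst this; decide
      obtain ⟨p, hp⟩ := d2
      obtain ⟨q, hq⟩ := d6
      rw [PySem.Int.floordiv_eq_ediv_of_pos (by norm_num),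
          PySem.Int.floordiv_eq_ediv_of_pos (by norm_num), hp, hq,
          Int.mul_ediv_cancel_left _ (by norm_num),
          Int.mul_ediv_cancel_left _ (by norm_num)]
      omega
  · simp only [if_neg hab, if_pos (by omega : a > b)]
    by_cases hlo : b ≤ 0
    · rw [PySem.List.pyRange_one_eq_nil (by omega)]
      simp [hlo]
    · rw [if_neg hlo]
      have hF := outer_loop b.toNat b a (by omega) (by omega)
      have d2 : (2 : Int) ∣ b * a * (a - 1) := by
        obtain ⟨k, hk⟩ := two_dvd_succ_mul (a - 1)
        exact ⟨b * k, by linear_combination b * hk⟩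
      have d6 : (6 : Int) ∣ b * (b - 1) * (b - 2) := by
        obtain ⟨q, hq⟩ := six_dvd_three_consec (b - 2).toNat
        by_cases h2 : 2 ≤ b
        · exact ⟨q, by rw [show (((b - 2).toNat : Int)) = b - 2 by omega] at hq; linear_combination hq⟩
        · have : b = 1 := by omega
          subst this; decide
      obtain ⟨p, hp⟩ := d2
      obtain ⟨q, hq⟩ := d6
      rw [PySem.Int.floordiv_eq_ediv_of_pos (by norm_num),
          PySem.Int.floordiv_eq_ediv_of_pos (by norm_num), hp, hq,
          Int.mul_ediv_cancel_left _ (by norm_num),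
          Int.mul_ediv_cancel_left _ (by norm_num)]
      omega
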